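-- pv_equiv track=rewrite | github.com/edt-yxz-zzd/python3_src | seed/math/merge_coprimess_into_smaller_coprimes.py | _remove_gcd_pow
-- ===== SOURCE A (Python) =====
-- def _remove_gcd_pow(n, g, /):
--     'n -> g -> m # [n==m*g**k][m%g=!=0]'
--     # [m =[def]= n//g**max_power_of_base_as_factor_of_(g, n)]
--     assert n > 0
--     assert g > 1
--     m = n
--     pows = [g]
--         # [pows[i] == g**(2**i)]
--     while 1:
--         gg = pows[-1]
--         q, r = divmod(m, gg)
--         if r:
--             pows.pop()
--             k = (1<<len(pows)) -1
--             break
--         m = q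
--         pows.append(gg**2)
--     k, m
--     # [n == m*g**k]
--     while pows:
--         gg = pows.pop()
--         q, r = divmod(m, gg)
--         if r==0:
--             m = q
--             k += 1<<len(pows)
--     assert not m%g == 0
--     assert n == m*g**k
--     return m
-- ===== SOURCE B (Python) =====
-- def _remove_gcd_pow(n, g, /):
--     'n -> g -> m # [n==m*g**k][m%g=!=0]'
--     assert n > 0
--     assert g > 1
--     m = n
--     while m % g == 0:
--         m //= g
--     return m
-- ===== Notes on version B (the rewrite author's own statement) =====
-- stated objective: simpler
-- what changed: Replaces the binary-doubling power stack (square g repeatedly, then greedily divide out the stacked powers back-to-front) with a plain linear factor-stripping loop `while m % g == 0: m //= g`.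
import Mathlib
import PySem

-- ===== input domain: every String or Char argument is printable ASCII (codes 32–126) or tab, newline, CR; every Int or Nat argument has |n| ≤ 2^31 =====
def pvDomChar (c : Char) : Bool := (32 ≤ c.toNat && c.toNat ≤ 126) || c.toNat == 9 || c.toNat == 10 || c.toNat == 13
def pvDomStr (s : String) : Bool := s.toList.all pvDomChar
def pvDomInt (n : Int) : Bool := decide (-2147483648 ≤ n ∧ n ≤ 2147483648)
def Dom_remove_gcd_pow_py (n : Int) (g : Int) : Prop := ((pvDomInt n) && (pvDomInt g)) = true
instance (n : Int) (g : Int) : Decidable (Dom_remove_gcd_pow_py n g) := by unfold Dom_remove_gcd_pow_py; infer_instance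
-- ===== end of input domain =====

-- B replaces A's binary-doubling power stack by a plain `while m % g == 0: m //= g` loop (simpler, not faster).

-- ===== PORT A =====
-- first `while 1:` loop of A: pows[-1], divmod, break when r ≠ 0, else m = q and append gg**2.
-- The dite guard (1 < gg ∧ 0 < q ∧ q < m) only makes the recursion total; on every input admitted
-- by Pre_ it holds at each iteration, so the else-branch is never taken there.
def pvLoop1 (g : Int) (m : Int) (pows : List Int) : Int × Int × List Int :=
  let gg := pows.getLast?.getD 0
  let q := PySem.Int.floordiv m gg
  let r := PySem.Int.mod m gg
  if r ≠ 0 then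
    (m, (2 : Int) ^ pows.dropLast.length - 1, pows.dropLast)
  else if _h : 1 < gg ∧ 0 < q ∧ q < m then
    pvLoop1 g q (pows ++ [gg ^ (2 : Nat)])
  else (m, 0, pows)
termination_by m.toNat
decreasing_by
  simp only [gg, q] at *
  omega

-- second `while pows:` loop of A: pop the last power, divide it out when it divides m.
def pvLoop2 (m : Int) (k : Int) (pows : List Int) : Int × Int :=
  match h : pows.getLast? with
  | none => (m, k)
  | some gg =>
    let q := PySem.Int.floordiv m gg
    let r := PySem.Int.mod m gg
    if r = 0 then pvLoop2 q (k + (2 : Int) ^ pows.dropLast.length) pows.dropLast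
    else pvLoop2 m k pows.dropLast
termination_by pows.length
decreasing_by
  · cases pows with
    | nil => simp at h
    | cons a t => simp [List.length_dropLast]
  · cases pows with
    | nil => simp at h
    | cons a t => simp [List.length_dropLast]

-- `assert n > 0` / `assert g > 1` raise AssertionError outside Pre_; the final asserts always pass there.
def remove_gcd_pow_py (n : Int) (g : Int) : Int :=
  let r1 := pvLoop1 g n [g]
  let r2 := pvLoop2 r1.1 r1.2.1 r1.2.2
  r2.1

-- ===== PORT B =====
-- `while m % g == 0: m //= g`; the dite guard only makes the recursion total (holds throughout under Pre_).
def pvStrip (g : Int) (m : Int) : Int :=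
  if _h : 1 < g ∧ 0 < m then
    if PySem.Int.mod m g = 0 then pvStrip g (PySem.Int.floordiv m g) else m
  else m
termination_by m.toNat
decreasing_by
  rename_i hmod
  have hg0 : (0:Int) < g := by omega
  obtain ⟨q, hq⟩ := (PySem.Int.mod_eq_zero_iff_dvd m g).mp hmod
  have hq' : PySem.Int.floordiv m g = q := by
    rw [PySem.Int.floordiv_eq_ediv_of_pos hg0, hq, Int.mul_ediv_cancel_left _ (by omega)]
  have hqpos : 0 < q := by nlinarith
  have hqlt : q < m := by nlinarith
  rw [hq']
  omega

-- `assert n > 0` / `assert g > 1` raise AssertionError outside Pre_.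
def remove_gcd_pow_py_alt (n : Int) (g : Int) : Int := pvStrip g n

-- ===== PRECONDITION & SPEC =====
-- Pre_ excludes exactly the inputs on which Python A raises AssertionError (`assert n > 0`, `assert g > 1`).
def Pre_remove_gcd_pow_py (n : Int) (g : Int) : Prop := 0 < n ∧ 1 < g
instance (n : Int) (g : Int) : Decidable (Pre_remove_gcd_pow_py n g) := by unfold Pre_remove_gcd_pow_py; infer_instance
def pvWitness_remove_gcd_pow_py : Int × Int := (12, 2)

def Spec_remove_gcd_pow_py (n : Int) (g : Int) (out : Int) : Prop := out = remove_gcd_pow_py_alt n g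
instance (n : Int) (g : Int) (out : Int) : Decidable (Spec_remove_gcd_pow_py n g out) := by unfold Spec_remove_gcd_pow_py; infer_instance

-- ===== CLAIM (what is proved, stated in full; the proofs are below) =====
def Claim_equal_remove_gcd_pow_py : Prop := ∀ (n : Int) (g : Int), Dom_remove_gcd_pow_py n g → Pre_remove_gcd_pow_py n g → Spec_remove_gcd_pow_py n g (remove_gcd_pow_py n g)

-- ===== LEMMAS AND PROOFS =====

-- pows after i iterations of A's first loop: [g, g², g⁴, …]; pvPowList g L = [g^(2^0), …, g^(2^(L-1))]
def pvPowList (g : Int) : Nat → List Int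
  | 0 => []
  | L+1 => pvPowList g L ++ [g ^ (2 ^ L)]

theorem pvStrip_unique (g : Int) (hg : 1 < g) : ∀ (k : Nat) (m : Int), 0 < m → ¬ g ∣ m →
    pvStrip g (m * g ^ k) = m := by
  intro k
  induction k with
  | zero =>
    intro m hm hnd
    rw [pow_zero, mul_one, pvStrip]
    rw [dif_pos ⟨hg, hm⟩, if_neg]
    intro hmod
    exact hnd ((PySem.Int.mod_eq_zero_iff_dvd m g).mp hmod)
  | succ k ih =>
    intro m hm hnd
    have hg0 : (0:Int) < g := by omega
    have hM : (0:Int) < m * g ^ (k+1) := by positivity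
    have hdvd : g ∣ m * g ^ (k+1) := ⟨m * g ^ k, by ring⟩
    rw [pvStrip, dif_pos ⟨hg, hM⟩, if_pos ((PySem.Int.mod_eq_zero_iff_dvd _ g).mpr hdvd)]
    rw [PySem.Int.floordiv_eq_ediv_of_pos hg0]
    have : m * g ^ (k+1) = (m * g ^ k) * g := by ring
    rw [this, Int.mul_ediv_cancel _ (by omega)]
    exact ih m hm hnd

theorem pvPowList_last (g : Int) (L : Nat) :
    (pvPowList g (L+1)).getLast?.getD 0 = g ^ (2 ^ L) := by
  simp [pvPowList]

theorem pvPowList_dropLast (g : Int) (L : Nat) :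
    (pvPowList g (L+1)).dropLast = pvPowList g L := by
  simp [pvPowList]

theorem pvLoop2_spec (g : Int) (hg : 1 < g) : ∀ (L : Nat) (m k : Int), 0 < m →
    ¬ g ^ (2 ^ L) ∣ m →
    ∃ (m₂ : Int) (j : Nat), (pvLoop2 m k (pvPowList g L)).1 = m₂ ∧ m = m₂ * g ^ j ∧ 0 < m₂ ∧ ¬ g ∣ m₂ := by
  intro L
  induction L with
  | zero =>
    intro m k hm hnd
    refine ⟨m, 0, ?_, by ring, hm, ?_⟩
    · rw [pvLoop2]; simp [pvPowList]
    · simpa using hnd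
  | succ L ih =>
    intro m k hm hnd
    have hg0 : (0:Int) < g := by omega
    have hlast : (pvPowList g (L+1)).getLast? = some (g ^ (2 ^ L)) := by simp [pvPowList]
    rw [pvLoop2.eq_def, hlast]
    simp only [pvPowList_dropLast]
    by_cases hmod : PySem.Int.mod m (g ^ (2 ^ L)) = 0
    · rw [if_pos hmod]
      have hdvd : g ^ (2 ^ L) ∣ m := (PySem.Int.mod_eq_zero_iff_dvd _ _).mp hmod
      obtain ⟨q, hq⟩ := hdvd
      have hq' : PySem.Int.floordiv m (g ^ (2 ^ L)) = q := by
        rw [PySem.Int.floordiv_eq_ediv_of_pos (by positivity), hq,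
          Int.mul_ediv_cancel_left _ (by positivity)]
      have hqpos : 0 < q := by nlinarith [pow_pos hg0 (2 ^ L)]
      have hqnd : ¬ g ^ (2 ^ L) ∣ q := by
        intro ⟨c, hc⟩
        apply hnd
        refine ⟨c, ?_⟩
        rw [hq, hc]
        rw [show (2:Nat) ^ (L+1) = 2 ^ L + 2 ^ L by omega, pow_add]
        ring
      rw [hq']
      obtain ⟨m₂, j, h1, h2, h3, h4⟩ := ih q (k + 2 ^ (pvPowList g L).length) hqpos hqnd
      refine ⟨m₂, j + 2 ^ L, h1, ?_, h3, h4⟩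
      rw [hq, h2, pow_add]; ring
    · rw [if_neg hmod]
      have hnd' : ¬ g ^ (2 ^ L) ∣ m := fun hd =>
        hmod ((PySem.Int.mod_eq_zero_iff_dvd _ _).mpr hd)
      exact ih m k hm hnd'

theorem pvLoop1_spec (g : Int) (hg : 1 < g) : ∀ (N : Nat) (m : Int), m.toNat ≤ N → 0 < m → ∀ (L : Nat),
    ∃ (m₁ k₁ : Int) (L₁ e : Nat), pvLoop1 g m (pvPowList g (L+1)) = (m₁, k₁, pvPowList g L₁) ∧
      0 < m₁ ∧ m = m₁ * g ^ e ∧ ¬ g ^ (2 ^ L₁) ∣ m₁ := by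
  intro N
  induction N with
  | zero => intro m hmN hm L; omega
  | succ N ih =>
    intro m hmN hm L
    have hg0 : (0:Int) < g := by omega
    have hgg1 : 1 < g ^ (2 ^ L) := one_lt_pow₀ hg (by positivity)
    rw [pvLoop1.eq_def]
    simp only [pvPowList_last, pvPowList_dropLast]
    by_cases hmod : PySem.Int.mod m (g ^ (2 ^ L)) = 0
    · simp only [hmod, ne_eq, not_true_eq_false, if_false]
      have hdvd : g ^ (2 ^ L) ∣ m := (PySem.Int.mod_eq_zero_iff_dvd _ _).mp hmod
      obtain ⟨q, hq⟩ := hdvd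
      have hq' : PySem.Int.floordiv m (g ^ (2 ^ L)) = q := by
        rw [PySem.Int.floordiv_eq_ediv_of_pos (by positivity), hq,
          Int.mul_ediv_cancel_left _ (by positivity)]
      have hqpos : 0 < q := by nlinarith [pow_pos hg0 (2 ^ L)]
      have hqlt : q < m := by nlinarith
      rw [hq', dif_pos ⟨hgg1, hqpos, hqlt⟩]
      have hsq : pvPowList g (L+1) ++ [(g ^ (2 ^ L)) ^ (2:Nat)] = pvPowList g (L+2) := by
        rw [show (g ^ (2 ^ L)) ^ (2:Nat) = g ^ (2 ^ (L+1)) by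
          rw [← pow_mul, show 2 ^ L * 2 = 2 ^ (L+1) by omega]]
        rfl
      rw [hsq]
      obtain ⟨m₁, k₁, L₁, e, h1, h2, h3, h4⟩ := ih q (by omega) hqpos (L+1)
      refine ⟨m₁, k₁, L₁, e + 2 ^ L, h1, h2, ?_, h4⟩
      rw [hq, h3, pow_add]; ring
    · simp only [hmod, ne_eq, not_false_eq_true, if_true]
      refine ⟨m, _, L, 0, rfl, hm, by ring, ?_⟩
      exact fun hd => hmod ((PySem.Int.mod_eq_zero_iff_dvd _ _).mpr hd)

-- ===== VERDICT (by name: the statement is the Claim_ definition above) =====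
theorem remove_gcd_pow_py_spec : Claim_equal_remove_gcd_pow_py := by
  intro n g _hdom hpre
  obtain ⟨hn, hg⟩ := hpre
  have h1 : pvPowList g 1 = [g] := by simp [pvPowList]
  obtain ⟨m₁, k₁, L₁, e, hL1, hm₁, hne, hnd₁⟩ := pvLoop1_spec g hg n.toNat n le_rfl hn 0
  rw [h1] at hL1
  obtain ⟨m₂, j, hL2, hm₂e, hm₂, hnd₂⟩ := pvLoop2_spec g hg L₁ m₁ k₁ hm₁ hnd₁
  show remove_gcd_pow_py n g = remove_gcd_pow_py_alt n g
  have hA : remove_gcd_pow_py n g = m₂ := by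
    simp only [remove_gcd_pow_py, hL1]
    exact hL2
  have hcomp : n = m₂ * g ^ (j + e) := by
    rw [hne, hm₂e, pow_add]; ring
  have hB : remove_gcd_pow_py_alt n g = m₂ := by
    simp only [remove_gcd_pow_py_alt]
    rw [hcomp]
    exact pvStrip_unique g hg (j + e) m₂ hm₂ hnd₂
  rw [hA, hB]
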